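-- pv_equiv track=rewrite | github.com/okomarov/aoc | 2019/old/day16_notes.py | get_pattern_monster
-- ===== SOURCE A (Python) =====
-- base = [0, 1, 0, -1]
--
-- def get_pattern_monster(i, n):
--     match = []
--     p = 0
--     c = 0
--     while len(match) < n:
--         if i == 0 and c == 0:
--             p += 1
--         to_append = [base[p]] * (i + 1)
--         if c == 0 and i > 0:
--             match += to_append[1:]
--         else:
--             match += to_append
--         p = (p + 1) % len(base)
--         c += 1
--     return match[:n]
-- ===== SOURCE B (Python) =====
-- base = [0, 1, 0, -1]
--
-- def get_pattern_monster(i, n):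
--     # closed form: output position j is base[((j + 1) // (i + 1)) % 4]
--     return [base[((j + 1) // (i + 1)) % 4] for j in range(n)]
-- ===== Notes on version B (the rewrite author's own statement) =====
-- stated objective: simpler
-- what changed: Replaces the stateful chunk-appending while-loop (phase p, counter c, drop-first-chunk special case, final truncation) with a closed-form per-index comprehension base[((j+1)//(i+1))%4]; Pre_ excludes i < 0 with n > 0, where A loops forever (never returns) and B raises ZeroDivisionError for i == -1.
import Mathlib
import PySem

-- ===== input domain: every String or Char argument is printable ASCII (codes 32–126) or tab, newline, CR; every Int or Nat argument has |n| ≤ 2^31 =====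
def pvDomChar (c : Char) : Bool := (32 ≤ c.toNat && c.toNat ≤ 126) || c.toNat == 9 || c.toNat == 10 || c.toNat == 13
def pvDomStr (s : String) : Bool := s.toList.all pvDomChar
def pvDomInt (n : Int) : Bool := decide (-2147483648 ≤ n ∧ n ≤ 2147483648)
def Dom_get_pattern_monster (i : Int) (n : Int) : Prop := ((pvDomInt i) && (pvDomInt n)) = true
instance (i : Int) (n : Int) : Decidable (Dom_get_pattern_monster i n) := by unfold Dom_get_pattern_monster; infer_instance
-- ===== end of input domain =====

-- B replaces A's stateful chunk-appending while-loop by the closed-form per-index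
-- formula base[((j+1)//(i+1)) % 4] (simpler, same O(n) cost); Pre_ excludes i < 0 with
-- n > 0, where the Python A loops forever and never returns.


-- module-level constant `base = [0, 1, 0, -1]`
def pvBase : List Int := [0, 1, 0, -1]

-- ===== PORT A =====
-- the while-loop, fuel-guarded for totality only (inside Pre_ each iteration grows
-- `acc` by at least one element, so fuel n.toNat is never exhausted before the loop exits)
def monsterLoop (i n : Int) : Nat → List Int → Int → Int → List Int
  | 0, acc, _, _ => acc
  | fuel+1, acc, p, c =>
    if (acc.length : Int) < n then
      let p1 : Int := if i = 0 ∧ c = 0 then p + 1 else p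
      let toAppend := List.replicate (i + 1).toNat (PySem.List.pyGetD pvBase p1 0)
      let acc2 := if c = 0 ∧ 0 < i then acc ++ toAppend.tail else acc ++ toAppend
      monsterLoop i n fuel acc2 (PySem.Int.mod (p1 + 1) (pvBase.length : Int)) (c + 1)
    else acc

def get_pattern_monster (i : Int) (n : Int) : List Int :=
  PySem.List.slice (monsterLoop i n n.toNat [] 0 0) none (some n)

-- ===== PORT B =====
def get_pattern_monster_alt (i : Int) (n : Int) : List Int :=
  (PySem.List.pyRange 0 n 1).map (fun j =>
    PySem.List.pyGetD pvBase (PySem.Int.mod (PySem.Int.floordiv (j + 1) (i + 1)) 4) 0)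

-- ===== PRECONDITION & SPEC =====
-- Pre_ excludes exactly i < 0 with n > 0: there A's while-loop appends empty chunks
-- forever and never returns (and B raises ZeroDivisionError for i == -1).
def Pre_get_pattern_monster (i : Int) (n : Int) : Prop := 0 ≤ i ∨ n ≤ 0
instance (i : Int) (n : Int) : Decidable (Pre_get_pattern_monster i n) := by unfold Pre_get_pattern_monster; infer_instance
def pvWitness_get_pattern_monster : Int × Int := (2, 10)

def Spec_get_pattern_monster (i : Int) (n : Int) (out : List Int) : Prop := out = get_pattern_monster_alt i n
instance (i : Int) (n : Int) (out : List Int) : Decidable (Spec_get_pattern_monster i n out) := by unfold Spec_get_pattern_monster; infer_instance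

-- ===== CLAIM (what is proved, stated in full; the proofs are below) =====
def Claim_equal_get_pattern_monster : Prop := ∀ (i : Int) (n : Int), Dom_get_pattern_monster i n → Pre_get_pattern_monster i n → Spec_get_pattern_monster i n (get_pattern_monster i n)

-- ===== LEMMAS AND PROOFS =====

-- the closed-form value at (Int) position j
def pvG (i j : Int) : Int :=
  PySem.List.pyGetD pvBase (PySem.Int.mod (PySem.Int.floordiv (j + 1) (i + 1)) 4) 0

-- prefix of length k of the closed-form pattern
def pvPat (i : Int) (k : Nat) : List Int := (List.range k).map (fun j => pvG i (Int.ofNat j))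

-- length of A's accumulator after m loop iterations
def pvL (i : Int) (m : Nat) : Nat := m * (i.toNat + 1) - (if 0 < i then 1 else 0)

-- A's phase variable p after m loop iterations
def pvP (i : Int) (m : Nat) : Int := (((if i = 0 then m + 1 else m) % 4 : Nat) : Int)

lemma pvG_eq (i j : Int) (m : Nat)
    (hq : PySem.Int.floordiv (j + 1) (i + 1) = ((if i = 0 then m + 1 else m : Nat) : Int)) :
    pvG i j = PySem.List.pyGetD pvBase (pvP i m) 0 := by
  unfold pvG pvP
  rw [hq]
  have h4 : PySem.Int.mod ((((if i = 0 then m + 1 else m) : Nat)) : Int) 4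
      = ((((if i = 0 then m + 1 else m) % 4 : Nat)) : Int) := by
    rw [PySem.Int.mod_eq_emod_of_pos (by norm_num)]
    push_cast
    omega
  rw [h4]

lemma quot_in_chunk (i : Int) (hi : 0 ≤ i) (m : Nat) (hm : 1 ≤ m) (j : Nat)
    (hj1 : pvL i m ≤ j) (hj2 : j < pvL i m + (i + 1).toNat) :
    PySem.Int.floordiv ((j : Int) + 1) (i + 1) = ((if i = 0 then m + 1 else m : Nat) : Int) := by
  rw [PySem.Int.floordiv_eq_iff_of_pos (by omega)]
  unfold pvL at hj1 hj2
  by_cases h0 : i = 0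
  · subst h0
    rw [if_neg (lt_irrefl (0 : Int))] at hj1 hj2
    simp only [reduceIte]
    simp only [Int.toNat_zero] at hj2
    constructor <;> push_cast at hj1 hj2 ⊢ <;> omega
  · have hipos : 0 < i := lt_of_le_of_ne hi (Ne.symm h0)
    have hnat : ((i.toNat : Int)) = i := Int.toNat_of_nonneg hi
    rw [if_neg h0]
    rw [if_pos hipos] at hj1 hj2
    have h1 : (i + 1).toNat = i.toNat + 1 := by omega
    rw [h1] at hj2
    set N := m * (i.toNat + 1) with hN
    have hN1 : 0 < N := Nat.mul_pos (by omega) (by omega)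
    have hNI : ((N : Int)) = (m : Int) * (i + 1) := by
      rw [hN]; push_cast [hnat]; ring
    constructor
    · rw [← hNI]
      omega
    · rw [add_one_mul, ← hNI,
        show (i + 1 : Int) = ((i.toNat + 1 : Nat) : Int) by push_cast [hnat]; ring]
      omega

-- appending one full chunk extends the pattern prefix by (i+1) elements
lemma chunk_append (i : Int) (hi : 0 ≤ i) (m : Nat) (hm : 1 ≤ m) :
    pvPat i (pvL i m) ++ List.replicate (i + 1).toNat (PySem.List.pyGetD pvBase (pvP i m) 0)
      = pvPat i (pvL i m + (i + 1).toNat) := by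
  unfold pvPat
  rw [List.range_add]
  simp only [List.map_append, List.map_map]
  congr 1
  symm
  rw [List.eq_replicate_iff]
  refine ⟨by simp, ?_⟩
  intro b hb
  simp only [List.mem_map, List.mem_range, Function.comp] at hb
  obtain ⟨j, hj, rfl⟩ := hb
  rw [pvG_eq i _ m]
  exact quot_in_chunk i hi m hm (pvL i m + j) (by omega) (by omega)

lemma pvP_step (i : Int) (m : Nat) :
    PySem.Int.mod (pvP i m + 1) (pvBase.length : Int) = pvP i (m + 1) := by
  unfold pvP
  have : (pvBase.length : Int) = 4 := by simp [pvBase]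
  rw [this]
  by_cases h0 : i = 0 <;> simp only [h0, reduceIte] <;>
    · rw [PySem.Int.mod_eq_emod_of_pos (by norm_num)]
      push_cast
      omega

lemma pvL_step (i : Int) (hi : 0 ≤ i) (m : Nat) (hm : 1 ≤ m) :
    pvL i (m + 1) = pvL i m + (i + 1).toNat := by
  unfold pvL
  have h1 : (i + 1).toNat = i.toNat + 1 := by omega
  have hX : 0 < m * (i.toNat + 1) := Nat.mul_pos (by omega) (by omega)
  rw [h1, Nat.succ_mul]
  by_cases h0 : 0 < i <;> simp only [h0, reduceIte] <;> omega

lemma take_pvPat (i : Int) (k t : Nat) (h : t ≤ k) :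
    (pvPat i k).take t = pvPat i t := by
  unfold pvPat
  rw [← List.map_take, List.take_range]
  congr 1
  rw [min_eq_left h]

-- main loop invariant: from any state reached after m ≥ 1 iterations, with enough fuel,
-- the loop result truncated to n is the closed-form prefix of length n.toNat
lemma loop_inv (i n : Int) (hi : 0 ≤ i) (hn : 0 ≤ n) :
    ∀ (fuel m : Nat), 1 ≤ m → n.toNat ≤ pvL i m + fuel →
      (monsterLoop i n fuel (pvPat i (pvL i m)) (pvP i m) (m : Int)).take n.toNat
        = pvPat i n.toNat := by
  intro fuel
  induction fuel with
  | zero =>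
      intro m hm hf
      simp only [monsterLoop]
      exact take_pvPat i _ _ (by omega)
  | succ f ih =>
      intro m hm hf
      simp only [monsterLoop]
      by_cases hlt : ((pvPat i (pvL i m)).length : Int) < n
      · rw [if_pos hlt]
        have hc0 : ¬ ((m : Int) = 0) := by omega
        simp only [hc0, and_false, false_and, if_false]
        rw [chunk_append i hi m hm, pvP_step i m, ← pvL_step i hi m hm]
        have hlen : (pvPat i (pvL i m)).length = pvL i m := by
          unfold pvPat; simp
        rw [hlen] at hlt
        have : n.toNat ≤ pvL i (m + 1) + f := by
          rw [pvL_step i hi m hm]; omega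
        have := ih (m + 1) (by omega) this
        push_cast at this ⊢
        exact this
      · rw [if_neg hlt]
        have hlen : (pvPat i (pvL i m)).length = pvL i m := by
          unfold pvPat; simp
        rw [hlen] at hlt
        exact take_pvPat i _ _ (by omega)

-- the first iteration (c = 0) establishes the invariant at m = 1
lemma first_iter (i n : Int) (hi : 0 ≤ i) (hn : 0 < n) (f : Nat) :
    monsterLoop i n (f + 1) [] 0 0
      = monsterLoop i n f (pvPat i (pvL i 1)) (pvP i 1) 1 := by
  simp only [monsterLoop]
  rw [if_pos (by simpa using hn)]
  by_cases h0 : i = 0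
  · subst h0
    rw [if_neg (fun h => absurd h.2 (lt_irrefl (0 : Int))), if_pos ⟨rfl, trivial⟩]
    congr
  · have hipos : 0 < i := lt_of_le_of_ne hi (Ne.symm h0)
    rw [if_pos ⟨trivial, hipos⟩, if_neg (fun h => h0 h.1)]
    have hrep : (i + 1).toNat = i.toNat + 1 := by omega
    congr 1
    · -- [] ++ tail (replicate (i+1) base[0]) = pvPat i (pvL i 1)
      have hb0 : PySem.List.pyGetD pvBase (0 : Int) 0 = 0 := by decide
      rw [hb0, hrep, List.nil_append, List.replicate_succ, List.tail_cons]
      unfold pvPat pvL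
      rw [if_pos hipos]
      have hL : 1 * (i.toNat + 1) - 1 = i.toNat := by omega
      rw [hL]
      symm
      rw [List.eq_replicate_iff]
      refine ⟨by simp, ?_⟩
      intro b hb
      simp only [List.mem_map, List.mem_range] at hb
      obtain ⟨j, hj, rfl⟩ := hb
      unfold pvG
      have hnat : ((i.toNat : Int)) = i := Int.toNat_of_nonneg hi
      have hq : PySem.Int.floordiv ((Int.ofNat j) + 1) (i + 1) = 0 := by
        rw [PySem.Int.floordiv_eq_iff_of_pos (by omega)]
        rw [zero_mul, show ((0:Int)+1)*(i+1) = i+1 by ring]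
        simp only [Int.ofNat_eq_natCast]
        constructor <;> omega
      rw [hq]
      decide
    · -- p after iteration 1
      unfold pvP
      rw [if_neg h0]
      decide

-- B's port is the closed-form prefix of length n.toNat
lemma alt_eq_pvPat (i n : Int) :
    get_pattern_monster_alt i n = pvPat i n.toNat := by
  unfold get_pattern_monster_alt pvPat
  rw [PySem.List.pyRange_one, List.map_map]
  simp only [Int.sub_zero, zero_add]
  rfl

-- ===== VERDICT (by name: the statement is the Claim_ definition above) =====
theorem get_pattern_monster_spec : Claim_equal_get_pattern_monster := by
  intro i n _ hpre
  unfold Spec_get_pattern_monster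
  rw [alt_eq_pvPat]
  by_cases hn : n ≤ 0
  · have h0 : n.toNat = 0 := by omega
    unfold get_pattern_monster
    rw [h0]
    simp only [monsterLoop]
    simp [PySem.List.slice, PySem.List.clampIdx, pvPat]
  · have hn' : 0 < n := by omega
    have hi : 0 ≤ i := by rcases hpre with h | h; exact h; omega
    unfold get_pattern_monster
    have hfuel : n.toNat = (n.toNat - 1) + 1 := by omega
    rw [PySem.List.slice_to _ (by omega : (0:Int) ≤ n)]
    rw [show monsterLoop i n n.toNat [] 0 0 = monsterLoop i n ((n.toNat - 1) + 1) [] 0 0 from by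
      rw [← hfuel]]
    rw [first_iter i n hi hn']
    exact loop_inv i n hi (by omega) (n.toNat - 1) 1 (le_refl 1)
      (by unfold pvL; by_cases h0 : 0 < i <;> simp only [h0, reduceIte] <;> omega)
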